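-- pv_equiv track=rewrite | github.com/tameemalam33/feuji_hackathon | services/crawler.py | _url_priority
-- ===== SOURCE A (Python) =====
-- def _url_priority(url: str, link_text: str = "") -> int:
--     """
--     Lower is higher priority.
--     - login/auth: highest
--     - forms: medium
--     - dashboard/search: medium
--     - static/legal/blog: low
--     """
--     u = (url or "").lower()
--     t = (link_text or "").lower()
--     s = u + " " + t
--     if any(k in s for k in ("login", "log in", "signin", "sign in", "auth", "account")):
--         return 0
--     if any(k in s for k in ("signup", "sign up", "register", "create account")):
--         return 5
--     if any(k in s for k in ("dashboard", "admin", "account", "settings")):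
--         return 15
--     if any(k in s for k in ("form", "contact", "subscribe", "checkout", "payment")):
--         return 20
--     if any(k in s for k in ("search", "find")):
--         return 25
--     if any(k in s for k in ("pricing", "plans")):
--         return 35
--     if any(k in s for k in ("blog", "docs", "help", "faq", "privacy", "terms")):
--         return 70
--     return 50
-- ===== SOURCE B (Python) =====
-- _KEYWORD_SCORE = {
--     "login": 0, "log in": 0, "signin": 0, "sign in": 0, "auth": 0, "account": 0,
--     "signup": 5, "sign up": 5, "register": 5, "create account": 5,
--     "dashboard": 15, "admin": 15, "settings": 15,
--     "form": 20, "contact": 20, "subscribe": 20, "checkout": 20, "payment": 20,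
--     "search": 25, "find": 25,
--     "pricing": 35, "plans": 35,
--     "blog": 70, "docs": 70, "help": 70, "faq": 70, "privacy": 70, "terms": 70,
-- }
--
--
-- def _url_priority(url: str, link_text: str = "") -> int:
--     """Single left-to-right scan of the text itself: at every position, take the
--     best (lowest) score of any keyword that starts there.  Correct because A's
--     tier scores strictly ascend with branch order, so A's first matching tier
--     equals the minimum score over all occurring keywords ('account' keeps its
--     lowest score, 0)."""
--     s = (url or "").lower() + " " + (link_text or "").lower()
--     best = None
--     for i in range(len(s)):
--         for kw, sc in _KEYWORD_SCORE.items():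
--             if (best is None or sc < best) and s.startswith(kw, i):
--                 best = sc
--     return 50 if best is None else best
-- ===== Notes on version B (the rewrite author's own statement) =====
-- stated objective: alternative
-- what changed: Replaced the keyword-driven if-cascade of substring-membership tests by a text-driven single left-to-right scan: a flat keyword-to-score map is consulted at every position of the combined lowercased string via startswith, keeping the running minimum score (valid because A's tier scores strictly ascend with branch order), with 50 when nothing matched.
import Mathlib
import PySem

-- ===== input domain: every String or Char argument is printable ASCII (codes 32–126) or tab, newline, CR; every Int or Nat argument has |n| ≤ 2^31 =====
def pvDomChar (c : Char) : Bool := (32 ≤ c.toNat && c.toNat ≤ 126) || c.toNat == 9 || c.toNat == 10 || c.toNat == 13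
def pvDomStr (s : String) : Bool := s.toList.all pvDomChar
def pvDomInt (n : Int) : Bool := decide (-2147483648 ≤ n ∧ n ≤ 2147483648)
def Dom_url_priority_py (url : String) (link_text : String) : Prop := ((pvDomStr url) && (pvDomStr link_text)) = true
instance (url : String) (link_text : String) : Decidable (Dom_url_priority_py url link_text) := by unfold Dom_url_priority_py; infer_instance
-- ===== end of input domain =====

-- B replaces A's keyword-driven if-cascade of substring-membership tests by a text-driven
-- positional scan with a flat keyword→score map and a running minimum (objective: alternative).

-- ===== PORT A =====
-- Python's `any(k in s for k in (...))`
def pvHit (s : String) (kws : List String) : Bool := kws.any (fun k => PySem.Str.isIn k s)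

def url_priority_py (url : String) (link_text : String) : Int :=
  let u := PySem.Str.lower (if url == "" then "" else url)
  let t := PySem.Str.lower (if link_text == "" then "" else link_text)
  let s := u ++ " " ++ t
  if pvHit s ["login", "log in", "signin", "sign in", "auth", "account"] then 0
  else if pvHit s ["signup", "sign up", "register", "create account"] then 5
  else if pvHit s ["dashboard", "admin", "account", "settings"] then 15
  else if pvHit s ["form", "contact", "subscribe", "checkout", "payment"] then 20
  else if pvHit s ["search", "find"] then 25
  else if pvHit s ["pricing", "plans"] then 35
  else if pvHit s ["blog", "docs", "help", "faq", "privacy", "terms"] then 70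
  else 50

-- ===== PORT B =====
-- Source B's _KEYWORD_SCORE dict as its items list (insertion order)
def pvKw : List (List Char × Int) :=
  [ ("login".toList, 0), ("log in".toList, 0), ("signin".toList, 0), ("sign in".toList, 0),
    ("auth".toList, 0), ("account".toList, 0),
    ("signup".toList, 5), ("sign up".toList, 5), ("register".toList, 5), ("create account".toList, 5),
    ("dashboard".toList, 15), ("admin".toList, 15), ("settings".toList, 15),
    ("form".toList, 20), ("contact".toList, 20), ("subscribe".toList, 20), ("checkout".toList, 20),
    ("payment".toList, 20),
    ("search".toList, 25), ("find".toList, 25),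
    ("pricing".toList, 35), ("plans".toList, 35),
    ("blog".toList, 70), ("docs".toList, 70), ("help".toList, 70), ("faq".toList, 70),
    ("privacy".toList, 70), ("terms".toList, 70) ]

-- `s.startswith(kw, i)` is ported as `PySem.Chars.startswith (s.drop i) kw`, exact for 0 ≤ i < len(s)
def url_priority_py_alt (url : String) (link_text : String) : Int :=
  let s := (PySem.Str.lower (if url == "" then "" else url) ++ " " ++
            PySem.Str.lower (if link_text == "" then "" else link_text)).toList
  let best := (List.range s.length).foldl
    (fun best i => pvKw.foldl
      (fun best p =>
        if (match best with | none => true | some b => decide (p.2 < b)) &&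
            PySem.Chars.startswith (s.drop i) p.1
        then some p.2 else best) best) (none : Option Int)
  match best with
  | some b => b
  | none => 50

-- ===== PRECONDITION & SPEC =====
def Spec_url_priority_py (url : String) (link_text : String) (out : Int) : Prop := out = url_priority_py_alt url link_text
instance (url : String) (link_text : String) (out : Int) : Decidable (Spec_url_priority_py url link_text out) := by unfold Spec_url_priority_py; infer_instance

-- ===== CLAIM (what is proved, stated in full; the proofs are below) =====
def Claim_equal_url_priority_py : Prop := ∀ (url : String) (link_text : String), Dom_url_priority_py url link_text → Spec_url_priority_py url link_text (url_priority_py url link_text)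

-- ===== LEMMAS AND PROOFS =====

-- `min`-accumulator over an optional best-so-far
def pvOptMin (o : Option Int) (v : Int) : Option Int :=
  some (match o with | none => v | some b => min b v)

def pvMinFold (o : Option Int) (l : List Int) : Option Int := l.foldl pvOptMin o

def pvRes (o : Option Int) : Int := match o with | some b => b | none => 50

-- scores of the keywords that start at position i of L
def pvScores (L : List Char) (i : Nat) : List Int :=
  (pvKw.filter (fun p => PySem.Chars.startswith (L.drop i) p.1)).map (·.2)

-- all scores collected over the whole scan
def pvT (L : List Char) : List Int := (List.range L.length).flatMap (pvScores L)

theorem pv_step_eq (b : Option Int) (p : List Char × Int) (suf : List Char) :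
    (if (match b with | none => true | some v => decide (p.2 < v)) &&
        PySem.Chars.startswith suf p.1 then some p.2 else b)
      = if PySem.Chars.startswith suf p.1 then pvOptMin b p.2 else b := by
  cases b <;> cases h : PySem.Chars.startswith suf p.1 <;>
    simp [pvOptMin, min_def] <;> split_ifs <;> simp <;> omega

theorem pv_inner_eq (P : List (List Char × Int)) (suf : List Char) : ∀ b : Option Int,
    P.foldl (fun best p =>
        if (match best with | none => true | some v => decide (p.2 < v)) &&
            PySem.Chars.startswith suf p.1 then some p.2 else best) b
      = pvMinFold b ((P.filter (fun p => PySem.Chars.startswith suf p.1)).map (·.2)) := by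
  induction P with
  | nil => intro b; rfl
  | cons p P ih =>
    intro b
    rw [List.foldl_cons, pv_step_eq, List.filter_cons]
    cases h : PySem.Chars.startswith suf p.1
    · simp only [Bool.false_eq_true, if_false]
      exact ih b
    · simp only [if_true, List.map_cons, pvMinFold, List.foldl_cons]
      exact ih _

theorem pv_outer_eq (L : List Char) (idxs : List Nat) : ∀ b : Option Int,
    idxs.foldl (fun b i => pvMinFold b (pvScores L i)) b
      = pvMinFold b (idxs.flatMap (pvScores L)) := by
  induction idxs with
  | nil => intro b; rfl
  | cons i idxs ih =>
    intro b
    rw [List.foldl_cons, List.flatMap_cons]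
    unfold pvMinFold
    rw [List.foldl_append]
    exact ih _

theorem pv_minFold_some (l : List Int) : ∀ b : Int, pvMinFold (some b) l = some (l.foldl min b) := by
  induction l with
  | nil => intro b; rfl
  | cons a l ih => intro b; simp [pvMinFold, List.foldl_cons, pvOptMin] at ih ⊢; exact ih _

theorem pv_fm_le_init (l : List Int) : ∀ a : Int, l.foldl min a ≤ a := by
  induction l with
  | nil => intro a; simp
  | cons x l ih =>
    intro a
    calc l.foldl min (min a x) ≤ min a x := ih _
    _ ≤ a := min_le_left _ _

theorem pv_fm_le_mem (l : List Int) : ∀ a x : Int, x ∈ l → l.foldl min a ≤ x := by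
  induction l with
  | nil => intro a x hx; simp at hx
  | cons y l ih =>
    intro a x hx
    rcases List.mem_cons.mp hx with rfl | hx
    · calc l.foldl min (min a x) ≤ min a x := pv_fm_le_init _ _
      _ ≤ x := min_le_right _ _
    · exact ih _ _ hx

theorem pv_le_fm (l : List Int) : ∀ a v : Int, v ≤ a → (∀ x ∈ l, v ≤ x) → v ≤ l.foldl min a := by
  induction l with
  | nil => intro a v h _; simpa using h
  | cons x l ih =>
    intro a v ha hl
    exact ih _ _ (le_min ha (hl x (List.mem_cons_self))) (fun y hy => hl y (List.mem_cons_of_mem _ hy))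

theorem pvRes_eq (l : List Int) (v : Int) (hv : v ∈ l) (hle : ∀ x ∈ l, v ≤ x) :
    pvRes (pvMinFold none l) = v := by
  cases l with
  | nil => simp at hv
  | cons a l =>
    have h1 : pvMinFold none (a :: l) = some (l.foldl min a) := by
      rw [← pv_minFold_some]; rfl
    rw [h1]
    show l.foldl min a = v
    refine le_antisymm ?_ (pv_le_fm l a v (hle a (List.mem_cons_self)) (fun x hx => hle x (List.mem_cons_of_mem _ hx)))
    rcases List.mem_cons.mp hv with rfl | hv
    · exact pv_fm_le_init _ _
    · exact pv_fm_le_mem _ _ _ hv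

theorem pvRes_empty (l : List Int) (h : ∀ x, x ∉ l) : pvRes (pvMinFold none l) = 50 := by
  have : l = [] := List.eq_nil_iff_forall_not_mem.mpr h
  subst this; rfl

theorem pv_kw_ne_nil : ∀ p ∈ pvKw, p.1 ≠ [] := by decide

theorem pv_mem_pvT (L : List Char) (x : Int) :
    x ∈ pvT L ↔ ∃ p ∈ pvKw, p.2 = x ∧ PySem.Chars.isIn p.1 L = true := by
  simp only [pvT, pvScores, List.mem_flatMap, List.mem_range, List.mem_map, List.mem_filter]
  constructor
  · rintro ⟨i, hi, p, ⟨hp, hsw⟩, hx⟩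
    refine ⟨p, hp, hx, ?_⟩
    exact (PySem.Chars.exists_prefix_drop_iff_isIn _ _).mp
      ⟨i, (PySem.Chars.startswith_iff _ _).mp hsw⟩
  · rintro ⟨p, hp, hx, hin⟩
    obtain ⟨j, hj⟩ := (PySem.Chars.exists_prefix_drop_iff_isIn _ _).mpr hin
    have hjlt : j < L.length := by
      by_contra h
      have : L.drop j = [] := List.drop_eq_nil_of_le (le_of_not_gt h)
      rw [this] at hj
      exact pv_kw_ne_nil p hp (List.prefix_nil.mp hj)
    exact ⟨j, hjlt, p, ⟨hp, (PySem.Chars.startswith_iff _ _).mpr hj⟩, hx⟩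

-- Chars-level version of pvHit
def pvHitC (L : List Char) (kws : List String) : Bool :=
  kws.any (fun k => PySem.Chars.isIn k.toList L)

-- the heart: the min over all collected scores equals A's cascade
set_option maxHeartbeats 1000000 in
theorem pv_main (L : List Char) :
    pvRes (pvMinFold none (pvT L)) =
      (if pvHitC L ["login", "log in", "signin", "sign in", "auth", "account"] then (0 : Int)
       else if pvHitC L ["signup", "sign up", "register", "create account"] then 5
       else if pvHitC L ["dashboard", "admin", "account", "settings"] then 15
       else if pvHitC L ["form", "contact", "subscribe", "checkout", "payment"] then 20
       else if pvHitC L ["search", "find"] then 25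
       else if pvHitC L ["pricing", "plans"] then 35
       else if pvHitC L ["blog", "docs", "help", "faq", "privacy", "terms"] then 70
       else 50) := by
  have Hm := fun x => pv_mem_pvT L x
  simp only [pvKw, List.mem_cons, List.not_mem_nil, exists_eq_or_imp, exists_eq_left, false_or, or_false,
    exists_false, false_and] at Hm
  simp only [pvHitC, List.any_cons, List.any_nil, Bool.or_false]
  cases h0 : (PySem.Chars.isIn "login".toList L || (PySem.Chars.isIn "log in".toList L || (PySem.Chars.isIn "signin".toList L || (PySem.Chars.isIn "sign in".toList L || (PySem.Chars.isIn "auth".toList L || PySem.Chars.isIn "account".toList L))))) with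
  | true =>
    rw [if_pos rfl]
    refine pvRes_eq _ 0 ((Hm 0).mpr ?_) ?_
    · simp only [Bool.or_eq_true] at h0
      rcases h0 with h|h|h|h|h|h
      · exact Or.inl ⟨rfl, h⟩
      · exact Or.inr (Or.inl ⟨rfl, h⟩)
      · exact Or.inr (Or.inr (Or.inl ⟨rfl, h⟩))
      · exact Or.inr (Or.inr (Or.inr (Or.inl ⟨rfl, h⟩)))
      · exact Or.inr (Or.inr (Or.inr (Or.inr (Or.inl ⟨rfl, h⟩))))
      · exact Or.inr (Or.inr (Or.inr (Or.inr (Or.inr (Or.inl ⟨rfl, h⟩)))))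
    · intro x hx
      have hd := (Hm x).mp hx
      rcases hd with ⟨h,-⟩|⟨h,-⟩|⟨h,-⟩|⟨h,-⟩|⟨h,-⟩|⟨h,-⟩|⟨h,-⟩|⟨h,-⟩|⟨h,-⟩|⟨h,-⟩|⟨h,-⟩|⟨h,-⟩|⟨h,-⟩|⟨h,-⟩|⟨h,-⟩|⟨h,-⟩|⟨h,-⟩|⟨h,-⟩|⟨h,-⟩|⟨h,-⟩|⟨h,-⟩|⟨h,-⟩|⟨h,-⟩|⟨h,-⟩|⟨h,-⟩|⟨h,-⟩|⟨h,-⟩|⟨h,-⟩ <;> omega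
  | false =>
    rw [if_neg (by simp)]
    simp only [Bool.or_eq_false_iff] at h0
    obtain ⟨hA0, hA1, hA2, hA3, hA4, hA5⟩ := h0
    simp only [hA0, hA1, hA2, hA3, hA4, hA5, Bool.false_eq_true, false_and, and_false, false_or, or_false] at Hm
    cases h1 : (PySem.Chars.isIn "signup".toList L || (PySem.Chars.isIn "sign up".toList L || (PySem.Chars.isIn "register".toList L || PySem.Chars.isIn "create account".toList L))) with
    | true =>
      rw [if_pos rfl]
      refine pvRes_eq _ 5 ((Hm 5).mpr ?_) ?_
      · simp only [Bool.or_eq_true] at h1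
        rcases h1 with h|h|h|h
        · exact Or.inl ⟨rfl, h⟩
        · exact Or.inr (Or.inl ⟨rfl, h⟩)
        · exact Or.inr (Or.inr (Or.inl ⟨rfl, h⟩))
        · exact Or.inr (Or.inr (Or.inr (Or.inl ⟨rfl, h⟩)))
      · intro x hx
        have hd := (Hm x).mp hx
        rcases hd with ⟨h,-⟩|⟨h,-⟩|⟨h,-⟩|⟨h,-⟩|⟨h,-⟩|⟨h,-⟩|⟨h,-⟩|⟨h,-⟩|⟨h,-⟩|⟨h,-⟩|⟨h,-⟩|⟨h,-⟩|⟨h,-⟩|⟨h,-⟩|⟨h,-⟩|⟨h,-⟩|⟨h,-⟩|⟨h,-⟩|⟨h,-⟩|⟨h,-⟩|⟨h,-⟩|⟨h,-⟩ <;> omega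
    | false =>
      rw [if_neg (by simp)]
      simp only [Bool.or_eq_false_iff] at h1
      obtain ⟨hB0, hB1, hB2, hB3⟩ := h1
      simp only [hB0, hB1, hB2, hB3, Bool.false_eq_true, false_and, and_false, false_or, or_false] at Hm
      cases h2 : (PySem.Chars.isIn "dashboard".toList L || (PySem.Chars.isIn "admin".toList L || (PySem.Chars.isIn "account".toList L || PySem.Chars.isIn "settings".toList L))) with
      | true =>
        rw [if_pos rfl]
        refine pvRes_eq _ 15 ((Hm 15).mpr ?_) ?_
        · simp only [hA5, Bool.or_false, Bool.false_or, Bool.or_eq_true] at h2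
          rcases h2 with h|h|h
          · exact Or.inl ⟨rfl, h⟩
          · exact Or.inr (Or.inl ⟨rfl, h⟩)
          · exact Or.inr (Or.inr (Or.inl ⟨rfl, h⟩))
        · intro x hx
          have hd := (Hm x).mp hx
          rcases hd with ⟨h,-⟩|⟨h,-⟩|⟨h,-⟩|⟨h,-⟩|⟨h,-⟩|⟨h,-⟩|⟨h,-⟩|⟨h,-⟩|⟨h,-⟩|⟨h,-⟩|⟨h,-⟩|⟨h,-⟩|⟨h,-⟩|⟨h,-⟩|⟨h,-⟩|⟨h,-⟩|⟨h,-⟩|⟨h,-⟩ <;> omega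
      | false =>
        rw [if_neg (by simp)]
        simp only [Bool.or_eq_false_iff] at h2
        obtain ⟨hC0, hC1, hC2, hC3⟩ := h2
        simp only [hC0, hC1, hC3, Bool.false_eq_true, false_and, and_false, false_or, or_false] at Hm
        cases h3 : (PySem.Chars.isIn "form".toList L || (PySem.Chars.isIn "contact".toList L || (PySem.Chars.isIn "subscribe".toList L || (PySem.Chars.isIn "checkout".toList L || PySem.Chars.isIn "payment".toList L)))) with
        | true =>
          rw [if_pos rfl]
          refine pvRes_eq _ 20 ((Hm 20).mpr ?_) ?_
          · simp only [Bool.or_eq_true] at h3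
            rcases h3 with h|h|h|h|h
            · exact Or.inl ⟨rfl, h⟩
            · exact Or.inr (Or.inl ⟨rfl, h⟩)
            · exact Or.inr (Or.inr (Or.inl ⟨rfl, h⟩))
            · exact Or.inr (Or.inr (Or.inr (Or.inl ⟨rfl, h⟩)))
            · exact Or.inr (Or.inr (Or.inr (Or.inr (Or.inl ⟨rfl, h⟩))))
          · intro x hx
            have hd := (Hm x).mp hx
            rcases hd with ⟨h,-⟩|⟨h,-⟩|⟨h,-⟩|⟨h,-⟩|⟨h,-⟩|⟨h,-⟩|⟨h,-⟩|⟨h,-⟩|⟨h,-⟩|⟨h,-⟩|⟨h,-⟩|⟨h,-⟩|⟨h,-⟩|⟨h,-⟩|⟨h,-⟩ <;> omega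
        | false =>
          rw [if_neg (by simp)]
          simp only [Bool.or_eq_false_iff] at h3
          obtain ⟨hD0, hD1, hD2, hD3, hD4⟩ := h3
          simp only [hD0, hD1, hD2, hD3, hD4, Bool.false_eq_true, false_and, and_false, false_or, or_false] at Hm
          cases h4 : (PySem.Chars.isIn "search".toList L || PySem.Chars.isIn "find".toList L) with
          | true =>
            rw [if_pos rfl]
            refine pvRes_eq _ 25 ((Hm 25).mpr ?_) ?_
            · simp only [Bool.or_eq_true] at h4
              rcases h4 with h|h
              · exact Or.inl ⟨rfl, h⟩
              · exact Or.inr (Or.inl ⟨rfl, h⟩)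
            · intro x hx
              have hd := (Hm x).mp hx
              rcases hd with ⟨h,-⟩|⟨h,-⟩|⟨h,-⟩|⟨h,-⟩|⟨h,-⟩|⟨h,-⟩|⟨h,-⟩|⟨h,-⟩|⟨h,-⟩|⟨h,-⟩ <;> omega
          | false =>
            rw [if_neg (by simp)]
            simp only [Bool.or_eq_false_iff] at h4
            obtain ⟨hE0, hE1⟩ := h4
            simp only [hE0, hE1, Bool.false_eq_true, false_and, and_false, false_or, or_false] at Hm
            cases h5 : (PySem.Chars.isIn "pricing".toList L || PySem.Chars.isIn "plans".toList L) with
            | true =>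
              rw [if_pos rfl]
              refine pvRes_eq _ 35 ((Hm 35).mpr ?_) ?_
              · simp only [Bool.or_eq_true] at h5
                rcases h5 with h|h
                · exact Or.inl ⟨rfl, h⟩
                · exact Or.inr (Or.inl ⟨rfl, h⟩)
              · intro x hx
                have hd := (Hm x).mp hx
                rcases hd with ⟨h,-⟩|⟨h,-⟩|⟨h,-⟩|⟨h,-⟩|⟨h,-⟩|⟨h,-⟩|⟨h,-⟩|⟨h,-⟩ <;> omega
            | false =>
              rw [if_neg (by simp)]
              simp only [Bool.or_eq_false_iff] at h5
              obtain ⟨hF0, hF1⟩ := h5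
              simp only [hF0, hF1, Bool.false_eq_true, false_and, and_false, false_or, or_false] at Hm
              cases h6 : (PySem.Chars.isIn "blog".toList L || (PySem.Chars.isIn "docs".toList L || (PySem.Chars.isIn "help".toList L || (PySem.Chars.isIn "faq".toList L || (PySem.Chars.isIn "privacy".toList L || PySem.Chars.isIn "terms".toList L))))) with
              | true =>
                rw [if_pos rfl]
                refine pvRes_eq _ 70 ((Hm 70).mpr ?_) ?_
                · simp only [Bool.or_eq_true] at h6
                  rcases h6 with h|h|h|h|h|h
                  · exact Or.inl ⟨rfl, h⟩
                  · exact Or.inr (Or.inl ⟨rfl, h⟩)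
                  · exact Or.inr (Or.inr (Or.inl ⟨rfl, h⟩))
                  · exact Or.inr (Or.inr (Or.inr (Or.inl ⟨rfl, h⟩)))
                  · exact Or.inr (Or.inr (Or.inr (Or.inr (Or.inl ⟨rfl, h⟩))))
                  · exact Or.inr (Or.inr (Or.inr (Or.inr (Or.inr (⟨rfl, h⟩)))))
                · intro x hx
                  have hd := (Hm x).mp hx
                  rcases hd with ⟨h,-⟩|⟨h,-⟩|⟨h,-⟩|⟨h,-⟩|⟨h,-⟩|⟨h,-⟩ <;> omega
              | false =>
                rw [if_neg (by simp)]
                simp only [Bool.or_eq_false_iff] at h6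
                obtain ⟨hG0, hG1, hG2, hG3, hG4, hG5⟩ := h6
                simp only [hG0, hG1, hG2, hG3, hG4, hG5, Bool.false_eq_true, false_and, and_false, false_or, or_false, iff_false] at Hm
                exact pvRes_empty _ Hm

-- B's fold computes pvRes∘pvMinFold of the collected scores
theorem pv_alt_fold (L : List Char) :
    ((List.range L.length).foldl
      (fun best i => pvKw.foldl
        (fun best p =>
          if (match best with | none => true | some b => decide (p.2 < b)) &&
              PySem.Chars.startswith (L.drop i) p.1
          then some p.2 else best) best) (none : Option Int))
      = pvMinFold none (pvT L) := by
  have h : ∀ (b : Option Int),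
      (List.range L.length).foldl
        (fun best i => pvKw.foldl
          (fun best p =>
            if (match best with | none => true | some b => decide (p.2 < b)) &&
                PySem.Chars.startswith (L.drop i) p.1
            then some p.2 else best) best) b
        = (List.range L.length).foldl (fun b i => pvMinFold b (pvScores L i)) b := by
    intro b
    apply PySem.List.foldl_congr_mem
    intro acc a _
    exact pv_inner_eq pvKw (L.drop a) acc
  rw [h, pv_outer_eq]
  rfl

-- the two bodies agree for any combined string s
theorem pv_bridge (s : String) :
    (if pvHit s ["login", "log in", "signin", "sign in", "auth", "account"] then (0 : Int)
     else if pvHit s ["signup", "sign up", "register", "create account"] then 5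
     else if pvHit s ["dashboard", "admin", "account", "settings"] then 15
     else if pvHit s ["form", "contact", "subscribe", "checkout", "payment"] then 20
     else if pvHit s ["search", "find"] then 25
     else if pvHit s ["pricing", "plans"] then 35
     else if pvHit s ["blog", "docs", "help", "faq", "privacy", "terms"] then 70
     else 50)
    = (match (List.range s.toList.length).foldl
        (fun best i => pvKw.foldl
          (fun best p =>
            if (match best with | none => true | some b => decide (p.2 < b)) &&
                PySem.Chars.startswith (s.toList.drop i) p.1
            then some p.2 else best) best) (none : Option Int) with
       | some b => b
       | none => 50) := by
  rw [pv_alt_fold]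
  show _ = pvRes (pvMinFold none (pvT s.toList))
  rw [pv_main]
  simp only [pvHit, pvHitC, List.any_cons, List.any_nil, PySem.Str.isIn_eq, Bool.or_false]

-- ===== VERDICT (by name: the statement is the Claim_ definition above) =====
theorem url_priority_py_spec : Claim_equal_url_priority_py := by
  intro url link_text _
  show url_priority_py url link_text = url_priority_py_alt url link_text
  simp only [url_priority_py, url_priority_py_alt]
  exact pv_bridge (PySem.Str.lower (if url == "" then "" else url) ++ " " ++
    PySem.Str.lower (if link_text == "" then "" else link_text))
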